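-- pv_equiv track=rewrite | github.com/AlexUnju/TP08-Listas-paralelas-matrices-anidadas | codigos/ejercicio14.py | ordenar_listas
-- ===== SOURCE A (Python) =====
-- def ordenar_listas(lst1, lst2, lst3):
--     # Obtener índices ordenados de 'A' y 'B'
--     indices_A = []
--     indices_B = []
--
--     for i, letra in enumerate(lst3):
--         if letra == 'A':
--             indices_A.append(i)
--         elif letra == 'B':
--             indices_B.append(i)
--
--     # Crear listas ordenadas
--     lst4 = []
--     lst5 = []
--     lst6 = []
--
--     for i in indices_A + indices_B:
--         lst4.append(lst1[i])
--         lst5.append(lst2[i])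
--         lst6.append(lst3[i])
--
--     return lst4, lst5, lst6
-- ===== SOURCE B (Python) =====
-- def ordenar_listas(lst1, lst2, lst3):
--     # Sort-then-split: gather the A/B rows once, stable-sort by label, unpack.
--     combos = [(lst1[i], lst2[i], lst3[i])
--               for i in range(len(lst3)) if lst3[i] in ('A', 'B')]
--     combos.sort(key=lambda t: t[2])
--     return ([t[0] for t in combos],
--             [t[1] for t in combos],
--             [t[2] for t in combos])
-- ===== Notes on version B (the rewrite author's own statement) =====
-- stated objective: idiomatic
-- what changed: Replaces the two explicit index-bucket passes (collect A-indices and B-indices, then re-index all three lists) with one comprehension gathering the A/B rows as tuples, a stable sort by label, and three unpacking comprehensions.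
import Mathlib
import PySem

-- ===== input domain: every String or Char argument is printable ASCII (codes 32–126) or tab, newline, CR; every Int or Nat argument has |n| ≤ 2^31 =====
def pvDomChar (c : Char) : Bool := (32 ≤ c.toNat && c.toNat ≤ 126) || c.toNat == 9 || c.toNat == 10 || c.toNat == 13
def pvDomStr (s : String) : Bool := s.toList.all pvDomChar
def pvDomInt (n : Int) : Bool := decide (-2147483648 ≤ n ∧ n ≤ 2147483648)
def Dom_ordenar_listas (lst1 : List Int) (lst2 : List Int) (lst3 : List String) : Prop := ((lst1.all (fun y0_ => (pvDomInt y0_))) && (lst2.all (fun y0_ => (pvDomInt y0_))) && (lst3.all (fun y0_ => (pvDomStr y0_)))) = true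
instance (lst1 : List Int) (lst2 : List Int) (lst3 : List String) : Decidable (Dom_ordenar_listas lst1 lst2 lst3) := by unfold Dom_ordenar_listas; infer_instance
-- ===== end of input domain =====

-- B replaces A's two index-bucket passes by gather-rows / stable-sort-by-label / unpack (idiomatic, not faster).

-- ===== PORT A =====
-- first loop: enumerate lst3, bucket the indices of 'A' and of 'B'
-- second loop: re-index the three lists along indices_A + indices_B
def ordenar_listas (lst1 : List Int) (lst2 : List Int) (lst3 : List String) : List Int × List Int × List String :=
  let idx := (PySem.List.enumerate lst3).foldl
    (fun (p : List Int × List Int) e =>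
      if e.2 = "A" then (p.1 ++ [e.1], p.2)
      else if e.2 = "B" then (p.1, p.2 ++ [e.1])
      else p) ([], [])
  -- lst1[i]/lst2[i]/lst3[i]: pyGetD; Python raises IndexError out of range — excluded by Pre_
  (idx.1 ++ idx.2).foldl
    (fun (r : List Int × List Int × List String) i =>
      (r.1 ++ [PySem.List.pyGetD lst1 i 0],
       r.2.1 ++ [PySem.List.pyGetD lst2 i 0],
       r.2.2 ++ [PySem.List.pyGetD lst3 i ""])) ([], [], [])

-- ===== PORT B =====
-- combos = [(lst1[i], lst2[i], lst3[i]) for i in range(len(lst3)) if lst3[i] in ('A','B')]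
-- combos.sort(key=lambda t: t[2]) ; three unpacking comprehensions
def ordenar_listas_alt (lst1 : List Int) (lst2 : List Int) (lst3 : List String) : List Int × List Int × List String :=
  let combos :=
    ((PySem.List.pyRange 0 (PySem.List.len lst3)).filter
      (fun i => PySem.List.pyGetD lst3 i "" == "A" || PySem.List.pyGetD lst3 i "" == "B")).map
      (fun i => (PySem.List.pyGetD lst1 i 0, PySem.List.pyGetD lst2 i 0, PySem.List.pyGetD lst3 i ""))
  let c := PySem.List.sorted combos (fun t => t.2.2)
  (c.map (fun t => t.1), c.map (fun t => t.2.1), c.map (fun t => t.2.2))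

-- ===== PRECONDITION & SPEC =====
-- Pre_ excludes exactly the inputs on which Python A raises IndexError: an index whose
-- label is 'A' or 'B' but which is out of range for lst1 or lst2.
def Pre_ordenar_listas (lst1 : List Int) (lst2 : List Int) (lst3 : List String) : Prop :=
  ∀ i ∈ List.range lst3.length,
    (lst3.getD i "" = "A" ∨ lst3.getD i "" = "B") → i < lst1.length ∧ i < lst2.length
instance (lst1 : List Int) (lst2 : List Int) (lst3 : List String) : Decidable (Pre_ordenar_listas lst1 lst2 lst3) := by unfold Pre_ordenar_listas; infer_instance
def pvWitness_ordenar_listas : List Int × List Int × List String := ([1, 2, 3], [4, 5, 6], ["B", "A", "C"])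

def Spec_ordenar_listas (lst1 : List Int) (lst2 : List Int) (lst3 : List String) (out : List Int × List Int × List String) : Prop := out = ordenar_listas_alt lst1 lst2 lst3
instance (lst1 : List Int) (lst2 : List Int) (lst3 : List String) (out : List Int × List Int × List String) : Decidable (Spec_ordenar_listas lst1 lst2 lst3 out) := by unfold Spec_ordenar_listas; infer_instance

-- ===== CLAIM (what is proved, stated in full; the proofs are below) =====
def Claim_equal_ordenar_listas : Prop := ∀ (lst1 : List Int) (lst2 : List Int) (lst3 : List String), Dom_ordenar_listas lst1 lst2 lst3 → Pre_ordenar_listas lst1 lst2 lst3 → Spec_ordenar_listas lst1 lst2 lst3 (ordenar_listas lst1 lst2 lst3)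

-- ===== LEMMAS AND PROOFS =====

-- A's first loop: the two index buckets are the 'A'- and 'B'-filters of the enumerated pairs.
theorem foldA1 (es : List (Int × String)) (a b : List Int) :
    es.foldl
      (fun (p : List Int × List Int) e =>
        if e.2 = "A" then (p.1 ++ [e.1], p.2)
        else if e.2 = "B" then (p.1, p.2 ++ [e.1])
        else p) (a, b)
    = (a ++ (es.filter (fun e => e.2 == "A")).map (fun e => e.1),
       b ++ (es.filter (fun e => e.2 == "B")).map (fun e => e.1)) := by
  induction es generalizing a b with
  | nil => simp
  | cons e es ih =>
    by_cases hA : e.2 = "A"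
    · simp [List.foldl_cons, hA, ih]
    · by_cases hB : e.2 = "B" <;> simp [List.foldl_cons, hA, hB, ih]

-- A's second loop: appending the three indexed values is mapping over the index list.
theorem foldA2 (lst1 lst2 : List Int) (lst3 : List String) (idxs : List Int)
    (a b : List Int) (c : List String) :
    idxs.foldl
      (fun (r : List Int × List Int × List String) i =>
        (r.1 ++ [PySem.List.pyGetD lst1 i 0],
         r.2.1 ++ [PySem.List.pyGetD lst2 i 0],
         r.2.2 ++ [PySem.List.pyGetD lst3 i ""])) (a, b, c)
    = (a ++ idxs.map (fun i => PySem.List.pyGetD lst1 i 0),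
       b ++ idxs.map (fun i => PySem.List.pyGetD lst2 i 0),
       c ++ idxs.map (fun i => PySem.List.pyGetD lst3 i "")) := by
  induction idxs generalizing a b c with
  | nil => simp
  | cons i idxs ih => simp [List.foldl_cons, ih]

theorem insertBy_append_of_not_before {α : Type} (before : α → α → Bool) (x : α)
    (l1 l2 : List α) (h : ∀ y ∈ l1, before x y = false) :
    PySem.List.insertBy before x (l1 ++ l2) = l1 ++ PySem.List.insertBy before x l2 := by
  induction l1 with
  | nil => simp
  | cons y l1 ih =>
    have hy : before x y = false := h y (by simp)
    simp only [List.cons_append, PySem.List.insertBy, hy]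
    simp [ih (fun z hz => h z (by simp [hz]))]

theorem insertBy_all_before {α : Type} (before : α → α → Bool) (x : α)
    (ys : List α) (h : ∀ y ∈ ys, before x y = true) :
    PySem.List.insertBy before x ys = x :: ys := by
  cases ys with
  | nil => rfl
  | cons y ys => simp [PySem.List.insertBy, h y (by simp)]

-- Stable sort of a list whose labels are all "A" or "B" is the "A"-rows followed by the "B"-rows.
theorem sorted_two_key {α : Type} (xs : List α) (key : α → String)
    (h : ∀ x ∈ xs, key x = "A" ∨ key x = "B") :
    PySem.List.sorted xs key
      = xs.filter (fun x => key x == "A") ++ xs.filter (fun x => key x == "B") := by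
  rw [PySem.List.sorted_eq_foldl_insertBy]
  induction xs using List.reverseRecOn with
  | nil => rfl
  | append_singleton xs x ih =>
    have hx : key x = "A" ∨ key x = "B" := h x (by simp)
    have hxs : ∀ y ∈ xs, key y = "A" ∨ key y = "B" := fun y hy => h y (by simp [hy])
    rw [List.foldl_append, List.foldl_cons, List.foldl_nil, ih hxs]
    have hA' : ∀ y ∈ xs.filter (fun z => key z == "A"), key y = "A" := by
      intro y hy; simpa using (List.mem_filter.mp hy).2
    have hB' : ∀ y ∈ xs.filter (fun z => key z == "B"), key y = "B" := by
      intro y hy; simpa using (List.mem_filter.mp hy).2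
    rcases hx with hx | hx
    · -- key x = "A": goes after the A-block, before the B-block
      rw [insertBy_append_of_not_before _ _ _ _
          (fun y hy => by simp [hx, hA' y hy])]
      rw [insertBy_all_before _ _ _
          (fun y hy => by simp [hx, hB' y hy]; decide)]
      simp [List.filter_append, hx]
    · -- key x = "B": goes at the very end
      rw [PySem.List.insertBy_of_forall_not_before _ _ _
          (fun y hy => by
            rcases List.mem_append.mp hy with hy | hy
            · simp [hx, hA' y hy]; decide
            · simp [hx, hB' y hy])]
      simp [List.filter_append, hx]

theorem ordenar_listas_eq (lst1 lst2 : List Int) (lst3 : List String) :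
    ordenar_listas lst1 lst2 lst3 = ordenar_listas_alt lst1 lst2 lst3 := by
  dsimp only [ordenar_listas, ordenar_listas_alt]
  rw [PySem.List.enumerate_eq_map_pyRange lst3 ""]
  rw [foldA1, foldA2]
  have hmem : ∀ x ∈ (((PySem.List.pyRange 0 (PySem.List.len lst3)).filter
      (fun i => PySem.List.pyGetD lst3 i "" == "A" || PySem.List.pyGetD lst3 i "" == "B")).map
      (fun i => (PySem.List.pyGetD lst1 i 0, PySem.List.pyGetD lst2 i 0, PySem.List.pyGetD lst3 i ""))),
      (fun t : Int × Int × String => t.2.2) x = "A" ∨ (fun t : Int × Int × String => t.2.2) x = "B" := by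
    intro x hx
    rcases List.mem_map.mp hx with ⟨i, hi, rfl⟩
    simpa using (List.mem_filter.mp hi).2
  rw [sorted_two_key _ _ hmem]
  have hA : ∀ x : String, ((x == "A") && (x == "A" || x == "B")) = (x == "A") := by
    intro x; by_cases h : x = "A" <;> simp [h]
  have hB : ∀ x : String, ((x == "B") && (x == "A" || x == "B")) = (x == "B") := by
    intro x; by_cases h : x = "B" <;> simp [h]
  simp [List.filter_map, List.filter_filter, List.map_append, List.map_map, Function.comp_def, hA, hB]

-- ===== VERDICT (by name: the statement is the Claim_ definition above) =====
theorem ordenar_listas_spec : Claim_equal_ordenar_listas := by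
  intro lst1 lst2 lst3 _ _
  unfold Spec_ordenar_listas
  exact ordenar_listas_eq lst1 lst2 lst3
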